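-- pv_equiv track=rewrite | github.com/kartikvrama/epic-kitchens-100-annotations | visualize_inactive_segments.py | parse_event_history
-- ===== SOURCE A (Python) =====
-- def parse_event_history(event_history):
--     """Group event_history into (narration, start_frame, end_frame) triples."""
--     entries = []
--     i = 0
--     while i < len(event_history):
--         item = event_history[i]
--         if item.startswith("narration:"):
--             narration = item.split("narration:", 1)[1]
--             start_frame = end_frame = None
--             if i + 1 < len(event_history) and event_history[i + 1].startswith("frame_id:"):
--                 start_frame = int(event_history[i + 1].split("frame_id:", 1)[1])
--                 i += 1
--             if i + 1 < len(event_history) and event_history[i + 1].startswith("frame_id:"):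
--                 end_frame = int(event_history[i + 1].split("frame_id:", 1)[1])
--                 i += 1
--             entries.append((narration, start_frame, end_frame))
--         i += 1
--     return entries
-- ===== SOURCE B (Python) =====
-- def parse_event_history(event_history):
--     """Group event_history into (narration, start_frame, end_frame) triples."""
--     triples = []
--     run = []  # up to two leading strings of the frame_id run right after the cursor
--     for item in reversed(event_history):
--         if item.startswith("frame_id:"):
--             run = [item] + run[:1]
--         elif item.startswith("narration:"):
--             vals = [int(s[len("frame_id:"):]) for s in run] + [None, None]
--             triples.append((item[len("narration:"):], vals[0], vals[1]))
--             run = []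
--         else:
--             run = []
--     triples.reverse()
--     return triples
-- ===== Notes on version B (the rewrite author's own statement) =====
-- stated objective: alternative
-- what changed: Replaces A's forward while-loop with explicit look-ahead and index skipping by a backward single pass that maintains the pending consecutive frame_id run as an accumulator and emits the triples back-to-front, reversing once at the end.
import Mathlib
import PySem

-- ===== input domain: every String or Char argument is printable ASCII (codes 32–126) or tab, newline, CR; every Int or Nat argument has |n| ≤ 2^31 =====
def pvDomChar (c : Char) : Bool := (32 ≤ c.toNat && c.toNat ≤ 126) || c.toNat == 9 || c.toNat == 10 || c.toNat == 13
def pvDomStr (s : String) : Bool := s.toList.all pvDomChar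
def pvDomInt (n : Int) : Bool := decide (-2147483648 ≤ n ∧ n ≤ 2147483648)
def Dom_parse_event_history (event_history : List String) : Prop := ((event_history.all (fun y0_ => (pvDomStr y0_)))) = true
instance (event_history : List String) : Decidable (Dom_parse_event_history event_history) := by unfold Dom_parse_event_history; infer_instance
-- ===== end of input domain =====

-- B replaces A's forward while-loop (look-ahead + manual index skipping) by a backward single
-- pass that threads the pending consecutive frame_id run and emits the triples back-to-front;
-- objective: alternative. Equivalence is about the return value; neither program mutates its argument.

-- int(s[len("frame_id:"):]) — exact: the startswith guard makes the drop of the 9-char prefix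
-- exactly Python's split("frame_id:", 1)[1] (A) and s[9:] (B); PySem.Int.ofStr? is int().
def pvFrameVal? (s : String) : Option Int := PySem.Int.ofStr? (String.ofList (s.toList.drop 9))

-- ===== PORT A =====
-- A's while-loop over index i; the in-place `i += 1` consumptions become branch-specific
-- recursion offsets (+1/+2/+3); `entries.append` becomes cons onto the recursive tail.
-- Where Python's int() raises ValueError the port carries `none` (excluded by Pre_ below).
def pvA_loop (eh : List String) (i : Nat) : List (String × Option Int × Option Int) :=
  if _h : i < eh.length then
    let item := eh.getD i ""
    if PySem.Str.startswith item "narration:" then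
      let narration := String.ofList (item.toList.drop 10)   -- split("narration:", 1)[1]
      if i + 1 < eh.length ∧ PySem.Str.startswith (eh.getD (i+1) "") "frame_id:" then
        let start_frame := pvFrameVal? (eh.getD (i+1) "")
        if i + 2 < eh.length ∧ PySem.Str.startswith (eh.getD (i+2) "") "frame_id:" then
          (narration, start_frame, pvFrameVal? (eh.getD (i+2) "")) :: pvA_loop eh (i+3)
        else
          (narration, start_frame, none) :: pvA_loop eh (i+2)
      else
        -- first look-ahead failed, so the second check re-tests the same (non-frame) item i+1
        (narration, none, none) :: pvA_loop eh (i+1)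
    else pvA_loop eh (i+1)
  else []
termination_by eh.length - i

def parse_event_history (event_history : List String) : List (String × Option Int × Option Int) :=
  pvA_loop event_history 0

-- ===== PORT B =====
-- Source B's loop body: state is (triples so far, run = up to two leading strings of the
-- frame_id run right after the cursor); `triples.append` is append at the back.
def pvB_step (acc : List (String × Option Int × Option Int) × List String) (item : String) :
    List (String × Option Int × Option Int) × List String :=
  if PySem.Str.startswith item "frame_id:" then
    (acc.1, item :: acc.2.take 1)
  else if PySem.Str.startswith item "narration:" then
    let vals := acc.2.map pvFrameVal? ++ [none, none]
    (acc.1 ++ [(String.ofList (item.toList.drop 10), vals.getD 0 none, vals.getD 1 none)], [])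
  else (acc.1, [])

-- `for item in reversed(event_history)` threading (triples, run), then `triples.reverse()`
def parse_event_history_alt (event_history : List String) : List (String × Option Int × Option Int) :=
  ((event_history.reverse.foldl pvB_step ([], [])).1).reverse

-- ===== PRECONDITION & SPEC =====
-- Pre_ excludes exactly the inputs where A raises ValueError: a frame_id token whose value is not
-- int()-parsable sitting in one of the two capture slots directly after a narration token.
def pvPreB (eh : List String) : Bool :=
  (List.range eh.length).all fun i =>
    !(PySem.Str.startswith (eh.getD i "") "narration:") ||
      ((!(PySem.Str.startswith (eh.getD (i+1) "") "frame_id:")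
          || (pvFrameVal? (eh.getD (i+1) "")).isSome) &&
       (!(PySem.Str.startswith (eh.getD (i+1) "") "frame_id:")
          || !(PySem.Str.startswith (eh.getD (i+2) "") "frame_id:")
          || (pvFrameVal? (eh.getD (i+2) "")).isSome))

def Pre_parse_event_history (event_history : List String) : Prop :=
  pvPreB event_history = true
instance (event_history : List String) : Decidable (Pre_parse_event_history event_history) := by
  unfold Pre_parse_event_history; infer_instance

def pvWitness_parse_event_history : List String :=
  ["narration:a", "frame_id:3", "x"]

def Spec_parse_event_history (event_history : List String) (out : List (String × Option Int × Option Int)) : Prop := out = parse_event_history_alt event_history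
instance (event_history : List String) (out : List (String × Option Int × Option Int)) : Decidable (Spec_parse_event_history event_history out) := by unfold Spec_parse_event_history; infer_instance

-- ===== CLAIM (what is proved, stated in full; the proofs are below) =====
def Claim_equal_parse_event_history : Prop := ∀ (event_history : List String), Dom_parse_event_history event_history → Pre_parse_event_history event_history → Spec_parse_event_history event_history (parse_event_history event_history)

-- ===== LEMMAS AND PROOFS =====

-- reference recursion both ports are reduced to
def pvB_vals : List String → List (Option Int)
  | [] => []
  | s :: rest =>
    if PySem.Str.startswith s "frame_id:" then pvFrameVal? s :: pvB_vals rest else []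

def pvB_frames (window : List String) : Option Int × Option Int :=
  match (pvB_vals window ++ [none, none]).take 2 with
  | a :: b :: _ => (a, b)
  | _ => (none, none)

def pvGold : List String → List (String × Option Int × Option Int)
  | [] => []
  | s :: rest =>
    if PySem.Str.startswith s "narration:" then
      (String.ofList (s.toList.drop 10), (pvB_frames (rest.take 2)).1, (pvB_frames (rest.take 2)).2)
        :: pvGold rest
    else pvGold rest

-- the frame run B maintains, characterised on the suffix still to the right of the cursor
def pvRunS : List String → List String
  | [] => []
  | s :: rest =>
    if PySem.Str.startswith s "frame_id:" then s :: (pvRunS rest).take 1 else []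

lemma pv_frame_not_narr (x : String) (h : PySem.Str.startswith x "frame_id:" = true) :
    PySem.Str.startswith x "narration:" = false := by
  have h' : "frame_id:".toList <+: x.toList := by
    rw [← PySem.Chars.startswith_iff]; simpa using h
  by_contra hn
  rw [Bool.not_eq_false] at hn
  have h2 : "narration:".toList <+: x.toList := by
    rw [← PySem.Chars.startswith_iff]; simpa using hn
  obtain ⟨t1, e1⟩ := h'
  obtain ⟨t2, e2⟩ := h2
  rw [← e1] at e2
  simp at e2

lemma pvGold_skip (x : String) (l : List String)
    (h : PySem.Str.startswith x "frame_id:" = true) : pvGold (x :: l) = pvGold l := by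
  simp only [pvGold]
  rw [pv_frame_not_narr x h]
  simp

lemma pv_getD_drop (eh : List String) (i j : Nat) :
    eh.getD (i + j) "" = (eh.drop i).getD j "" := by
  simp [List.getD_eq_getElem?_getD, List.getElem?_drop]

lemma pvA_loop_eq_gold (fuel : Nat) : ∀ (eh : List String) (i : Nat),
    eh.length ≤ i + fuel → pvA_loop eh i = pvGold (eh.drop i) := by
  induction fuel with
  | zero =>
    intro eh i hle
    rw [pvA_loop]
    simp only [Nat.add_zero] at hle
    rw [dif_neg (by omega)]
    rw [List.drop_eq_nil_of_le (by omega)]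
    rfl
  | succ n ih =>
    intro eh i hle
    rw [pvA_loop]
    by_cases h : i < eh.length
    · rw [dif_pos h]
      have hd : eh.drop i ≠ [] := by
        intro he; have := List.drop_eq_nil_iff.mp he; omega
      obtain ⟨s, rest, hrest⟩ : ∃ s rest, eh.drop i = s :: rest := by
        cases he : eh.drop i with
        | nil => exact absurd he hd
        | cons a t => exact ⟨a, t, rfl⟩
      have hlen : eh.length - i = rest.length + 1 := by
        have := congrArg List.length hrest; simpa using this
      have h0 : eh.getD i "" = s := by
        have := pv_getD_drop eh i 0; simp [hrest] at this; simpa using this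
      have hdrop1 : eh.drop (i+1) = rest := by
        have : eh.drop (i+1) = (eh.drop i).drop 1 := by
          rw [List.drop_drop]
        rw [this, hrest]; rfl
      rw [hrest, h0]
      by_cases c0 : PySem.Str.startswith s "narration:"
      · rw [if_pos c0]
        simp only [pvGold]
        rw [if_pos c0]
        cases rest with
        | nil =>
          simp only [List.length_nil] at hlen
          have c1 : ¬ (i + 1 < eh.length ∧ PySem.Str.startswith (eh.getD (i+1) "") "frame_id:" = true) := by
            intro ⟨a, _⟩; omega
          rw [if_neg c1]
          rw [ih eh (i+1) (by omega), hdrop1]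
          simp [pvB_frames, pvB_vals]
        | cons f1 rest1 =>
          simp only [List.length_cons] at hlen
          have hf1 : eh.getD (i+1) "" = f1 := by
            have := pv_getD_drop eh i 1; simp [hrest] at this; simpa using this
          have hdrop2 : eh.drop (i+2) = rest1 := by
            have : eh.drop (i+2) = (eh.drop (i+1)).drop 1 := by rw [List.drop_drop]
            rw [this, hdrop1]; rfl
          by_cases cf1 : PySem.Str.startswith f1 "frame_id:"
          · have cf1' : PySem.Chars.startswith f1.toList ['f','r','a','m','e','_','i','d',':'] = true := by simpa using cf1
            have c1 : i + 1 < eh.length ∧ PySem.Str.startswith (eh.getD (i+1) "") "frame_id:" = true := by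
              constructor
              · omega
              · rw [hf1]; exact cf1
            rw [if_pos c1, hf1]
            cases rest1 with
            | nil =>
              simp only [List.length_nil] at hlen
              have c2 : ¬ (i + 2 < eh.length ∧ PySem.Str.startswith (eh.getD (i+2) "") "frame_id:" = true) := by
                intro ⟨a, _⟩; omega
              rw [if_neg c2]
              rw [ih eh (i+2) (by omega), hdrop2]
              rw [pvGold_skip f1 [] cf1]
              simp [pvB_frames, pvB_vals, cf1']
            | cons f2 rest2 =>
              simp only [List.length_cons] at hlen
              have hf2 : eh.getD (i+2) "" = f2 := by
                have := pv_getD_drop eh i 2; simp [hrest] at this; simpa using this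
              have hlen2 : rest2.length + 3 ≤ eh.length - i := by omega
              by_cases cf2 : PySem.Str.startswith f2 "frame_id:"
              · have cf2' : PySem.Chars.startswith f2.toList ['f','r','a','m','e','_','i','d',':'] = true := by simpa using cf2
                have c2 : i + 2 < eh.length ∧ PySem.Str.startswith (eh.getD (i+2) "") "frame_id:" = true := by
                  exact ⟨by omega, by rw [hf2]; exact cf2⟩
                rw [if_pos c2, hf2]
                have hdrop3 : eh.drop (i+3) = rest2 := by
                  have : eh.drop (i+3) = (eh.drop (i+2)).drop 1 := by rw [List.drop_drop]
                  rw [this, hdrop2]; rfl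
                rw [ih eh (i+3) (by omega), hdrop3]
                rw [pvGold_skip f1 _ cf1, pvGold_skip f2 _ cf2]
                simp [pvB_frames, pvB_vals, cf1', cf2']
              · have c2 : ¬ (i + 2 < eh.length ∧ PySem.Str.startswith (eh.getD (i+2) "") "frame_id:" = true) := by
                  intro ⟨_, b⟩; rw [hf2] at b; exact cf2 b
                rw [if_neg c2]
                rw [ih eh (i+2) (by omega), hdrop2]
                rw [pvGold_skip f1 _ cf1]
                have cf2f : PySem.Chars.startswith f2.toList ['f','r','a','m','e','_','i','d',':'] = false := by
                  simpa using cf2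
                simp [pvB_frames, pvB_vals, cf1', cf2f]
          · have c1 : ¬ (i + 1 < eh.length ∧ PySem.Str.startswith (eh.getD (i+1) "") "frame_id:" = true) := by
              intro ⟨_, b⟩; rw [hf1] at b; exact cf1 b
            rw [if_neg c1]
            rw [ih eh (i+1) (by omega), hdrop1]
            have cf1f : PySem.Chars.startswith f1.toList ['f','r','a','m','e','_','i','d',':'] = false := by
              simpa using cf1
            simp [pvB_frames, pvB_vals, cf1f]
      · rw [if_neg c0]
        simp only [pvGold]
        rw [if_neg c0]
        exact (ih eh (i+1) (by omega)).trans (by rw [hdrop1])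
    · rw [dif_neg h]
      rw [List.drop_eq_nil_of_le (by omega)]
      rfl

-- the emitted pair at a narration: the run B carries determines exactly A's two capture slots
lemma pvB_pair (rest : List String) :
    let vals := (pvRunS rest).map pvFrameVal? ++ [none, none]
    pvB_frames (rest.take 2) = (vals.getD 0 none, vals.getD 1 none) := by
  cases rest with
  | nil => simp [pvRunS, pvB_frames, pvB_vals]
  | cons a t =>
    by_cases ca : PySem.Str.startswith a "frame_id:"
    · have ca' : PySem.Chars.startswith a.toList ['f','r','a','m','e','_','i','d',':'] = true := by
        simpa using ca
      cases t with
      | nil => simp [pvRunS, pvB_frames, pvB_vals, ca']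
      | cons b u =>
        by_cases cb : PySem.Str.startswith b "frame_id:"
        · have cb' : PySem.Chars.startswith b.toList ['f','r','a','m','e','_','i','d',':'] = true := by
            simpa using cb
          simp [pvRunS, pvB_frames, pvB_vals, ca', cb']
        · have cb' : PySem.Chars.startswith b.toList ['f','r','a','m','e','_','i','d',':'] = false := by
            simpa using cb
          simp [pvRunS, pvB_frames, pvB_vals, ca', cb']
    · have ca' : PySem.Chars.startswith a.toList ['f','r','a','m','e','_','i','d',':'] = false := by
        simpa using ca
      cases t with
      | nil => simp [pvRunS, pvB_frames, pvB_vals, ca']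
      | cons b u => simp [pvRunS, pvB_frames, pvB_vals, ca']

-- invariant of B's backward pass, phrased as a foldr over the original list
lemma pvB_fold (eh : List String) :
    eh.foldr (fun x y => pvB_step y x) ([], []) = ((pvGold eh).reverse, pvRunS eh) := by
  induction eh with
  | nil => simp [pvGold, pvRunS]
  | cons s rest ih =>
    rw [List.foldr_cons, ih]
    by_cases cf : PySem.Str.startswith s "frame_id:"
    · have cf' : PySem.Chars.startswith s.toList ['f','r','a','m','e','_','i','d',':'] = true := by
        simpa using cf
      rw [pvGold_skip s rest cf]
      simp [pvB_step, cf', pvRunS]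
    · have cf' : PySem.Chars.startswith s.toList ['f','r','a','m','e','_','i','d',':'] = false := by
        simpa using cf
      by_cases cn : PySem.Str.startswith s "narration:"
      · have cn' : PySem.Chars.startswith s.toList ['n','a','r','r','a','t','i','o','n',':'] = true := by
          simpa using cn
        have hp := pvB_pair rest
        simp only [pvB_step, pvGold, pvRunS]
        rw [hp]
        simp [cf', cn']
      · have cn' : PySem.Chars.startswith s.toList ['n','a','r','r','a','t','i','o','n',':'] = false := by
          simpa using cn
        simp [pvB_step, cf', cn', pvGold, pvRunS]

-- ===== VERDICT (by name: the statement is the Claim_ definition above) =====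
theorem parse_event_history_spec : Claim_equal_parse_event_history := by
  intro eh _ _
  unfold Spec_parse_event_history parse_event_history parse_event_history_alt
  rw [pvA_loop_eq_gold eh.length eh 0 (by omega)]
  rw [List.foldl_reverse, pvB_fold]
  simp
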